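-- pv_equiv track=rewrite | github.com/HappynessI/verl-for-AgentGym | examples/sglang_multiturn/my_exp/legacy/entropy_analysis/debug_vllm_error.py | build_prefix_for_turn
-- ===== SOURCE A (Python) =====
-- def build_prefix_for_turn(conversations, turn_idx, role="assistant"):
--     prefix_messages = []
--     role_count = 0
--     for msg in conversations:
--         msg_role = msg.get("role")
--         if msg_role == role:
--             if role_count == turn_idx:
--                 break
--             role_count += 1
--         prefix_messages.append(msg)
--     return prefix_messages
-- ===== SOURCE B (Python) =====
-- def build_prefix_for_turn(conversations, turn_idx, role="assistant"):
--     positions = [i for i, msg in enumerate(conversations) if msg.get("role") == role]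
--     if 0 <= turn_idx < len(positions):
--         return conversations[:positions[turn_idx]]
--     return conversations[:]
-- ===== Notes on version B (the rewrite author's own statement) =====
-- stated objective: simpler
-- what changed: B computes the cut point up front (the list of indices of matching-role messages, then one slice) instead of A's single pass with a running counter, break and element-by-element accumulation.
import Mathlib
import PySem

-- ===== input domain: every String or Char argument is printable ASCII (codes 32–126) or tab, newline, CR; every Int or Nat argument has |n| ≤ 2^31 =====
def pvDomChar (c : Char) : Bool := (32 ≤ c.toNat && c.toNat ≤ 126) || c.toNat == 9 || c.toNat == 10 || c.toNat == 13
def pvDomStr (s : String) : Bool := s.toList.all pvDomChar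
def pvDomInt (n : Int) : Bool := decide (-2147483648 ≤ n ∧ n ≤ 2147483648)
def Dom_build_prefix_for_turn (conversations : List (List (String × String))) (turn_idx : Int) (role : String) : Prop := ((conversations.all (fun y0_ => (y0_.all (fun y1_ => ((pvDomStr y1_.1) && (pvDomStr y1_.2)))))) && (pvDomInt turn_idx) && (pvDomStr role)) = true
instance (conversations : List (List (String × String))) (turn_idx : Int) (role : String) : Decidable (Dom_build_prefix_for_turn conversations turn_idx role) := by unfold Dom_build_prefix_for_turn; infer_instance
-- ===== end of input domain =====

-- ===== PORT A =====
-- B computes the cut point up front (indices of matching-role messages, one slice) instead of A's running counter with break; same return value everywhere.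
-- A's loop: walk the messages with a running role counter, breaking at the turn_idx-th match
def pvGoA (role : String) (turn_idx : Int) : List (List (String × String)) → Int → List (List (String × String))
  | [], _ => []
  | msg :: rest, role_count =>
    if (PySem.Dict.mk msg).get? "role" = some role then
      if role_count = turn_idx then []
      else msg :: pvGoA role turn_idx rest (role_count + 1)
    else msg :: pvGoA role turn_idx rest role_count

def build_prefix_for_turn (conversations : List (List (String × String))) (turn_idx : Int) (role : String) : List (List (String × String)) :=
  pvGoA role turn_idx conversations 0

-- ===== PORT B =====
-- the comprehension [i for i, msg in enumerate(conversations) if msg.get("role") == role]: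
-- enumerate = PySem.List.enumerate, the filtering comprehension = filterMap; then one slice
def build_prefix_for_turn_alt (conversations : List (List (String × String))) (turn_idx : Int) (role : String) : List (List (String × String)) :=
  let positions := (PySem.List.enumerate conversations).filterMap
    (fun im => if (PySem.Dict.mk im.2).get? "role" = some role then some im.1 else none)
  if 0 ≤ turn_idx ∧ turn_idx < (positions.length : Int) then
    PySem.List.slice conversations none (some (positions.getD turn_idx.toNat 0))
  else conversations

-- ===== PRECONDITION & SPEC =====
def Spec_build_prefix_for_turn (conversations : List (List (String × String))) (turn_idx : Int) (role : String) (out : List (List (String × String))) : Prop := out = build_prefix_for_turn_alt conversations turn_idx role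
instance (conversations : List (List (String × String))) (turn_idx : Int) (role : String) (out : List (List (String × String))) : Decidable (Spec_build_prefix_for_turn conversations turn_idx role out) := by unfold Spec_build_prefix_for_turn; infer_instance

-- ===== CLAIM (what is proved, stated in full; the proofs are below) =====
def Claim_equal_build_prefix_for_turn : Prop := ∀ (conversations : List (List (String × String))) (turn_idx : Int) (role : String), Dom_build_prefix_for_turn conversations turn_idx role → Spec_build_prefix_for_turn conversations turn_idx role (build_prefix_for_turn conversations turn_idx role)

-- ===== LEMMAS AND PROOFS =====

-- abbreviation used only in the proofs: the Nat-indexed form of B's position list, enumeration start i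
def pvPos (role : String) (cs : List (List (String × String))) (i : Nat) : List Nat :=
  (cs.zipIdx i).filterMap
    (fun mi => if (PySem.Dict.mk mi.1).get? "role" = some role then some mi.2 else none)

theorem pvPos_nil (role : String) (i : Nat) : pvPos role [] i = [] := rfl

theorem pvPos_cons (role : String) (m : List (String × String)) (rest : List (List (String × String))) (i : Nat) :
    pvPos role (m :: rest) i =
      if (PySem.Dict.mk m).get? "role" = some role then i :: pvPos role rest (i + 1)
      else pvPos role rest (i + 1) := by
  by_cases h : (PySem.Dict.mk m).get? "role" = some role <;> simp [pvPos, List.zipIdx_cons, h]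

-- shifting the enumeration start shifts every recorded index
theorem pvPos_shift (role : String) (cs : List (List (String × String))) (i : Nat) :
    pvPos role cs (i + 1) = (pvPos role cs i).map (· + 1) := by
  induction cs generalizing i with
  | nil => simp [pvPos_nil]
  | cons m rest ih =>
    by_cases h : (PySem.Dict.mk m).get? "role" = some role <;>
      simp [pvPos_cons, h, ih]

-- B's Int-indexed position list (enumerate from 0) is the Nat-indexed one, cast
theorem pvEnumPos_eq (role : String) (cs : List (List (String × String))) :
    (PySem.List.enumerate cs).filterMap
      (fun im => if (PySem.Dict.mk im.2).get? "role" = some role then some im.1 else none)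
    = (pvPos role cs 0).map Int.ofNat := by
  rw [PySem.List.enumerate_eq_zipIdx_map, List.filterMap_map, pvPos, List.map_filterMap]
  apply List.filterMap_congr
  intro mi _
  by_cases h : (PySem.Dict.mk mi.1).get? "role" = some role <;> simp [h]

-- B expressed over the Nat-indexed positions: the slice becomes a take
theorem alt_eq_nat (conversations : List (List (String × String))) (turn_idx : Int) (role : String) :
    build_prefix_for_turn_alt conversations turn_idx role =
      (let p := pvPos role conversations 0
       if 0 ≤ turn_idx ∧ turn_idx < (p.length : Int) then
         conversations.take (p.getD turn_idx.toNat 0)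
       else conversations) := by
  unfold build_prefix_for_turn_alt
  rw [pvEnumPos_eq]
  simp only [List.length_map]
  by_cases hc : 0 ≤ turn_idx ∧ turn_idx < ((pvPos role conversations 0).length : Int)
  · rw [if_pos hc, if_pos hc]
    have hlt : turn_idx.toNat < (pvPos role conversations 0).length := by omega
    simp [List.getD, List.getElem?_map, List.getElem?_eq_getElem hlt,
      PySem.List.slice_to_natCast]
  · rw [if_neg hc, if_neg hc]

-- the core invariant: A's loop with running counter role_count equals B's cut-point computation at target turn_idx - role_count
theorem pvGoA_eq (role : String) (turn_idx : Int) (cs : List (List (String × String))) (rc : Int) :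
    pvGoA role turn_idx cs rc =
      (let p := pvPos role cs 0
       if 0 ≤ turn_idx - rc ∧ turn_idx - rc < (p.length : Int) then
         cs.take (p.getD (turn_idx - rc).toNat 0)
       else cs) := by
  induction cs generalizing rc with
  | nil => simp [pvGoA, pvPos_nil]
  | cons m rest ih =>
    by_cases h : (PySem.Dict.mk m).get? "role" = some role
    · simp only [pvGoA, pvPos_cons, h, if_pos, pvPos_shift]
      by_cases ht : rc = turn_idx
      · subst ht
        simp
      · rw [if_neg ht, ih (rc + 1)]
        simp only []
        by_cases hc : 0 ≤ turn_idx - (rc + 1) ∧ turn_idx - (rc + 1) < ((pvPos role rest 0).length : Int)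
        · rw [if_pos hc]
          have hc' : 0 ≤ turn_idx - rc ∧ turn_idx - rc < (((pvPos role rest 0).map (· + 1)).length : Nat) + 1 := by
            simp only [List.length_map]; omega
          rw [if_pos (by simpa using hc')]
          have hidx : (turn_idx - rc).toNat = (turn_idx - (rc + 1)).toNat + 1 := by omega
          rw [hidx]
          have hlt : (turn_idx - (rc + 1)).toNat < (pvPos role rest 0).length := by omega
          simp [List.getD, List.getElem?_map, List.getElem?_eq_getElem hlt, List.take_succ_cons]
        · rw [if_neg hc]
          have : ¬ (0 ≤ turn_idx - rc ∧ turn_idx - rc < ((((pvPos role rest 0).map (· + 1)).length : Nat) : Int) + 1) := by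
            simp only [List.length_map]; omega
          rw [if_neg (by simpa using this)]
    · simp only [pvGoA, pvPos_cons, h, ite_false, pvPos_shift]
      rw [ih rc]
      simp only []
      by_cases hc : 0 ≤ turn_idx - rc ∧ turn_idx - rc < ((pvPos role rest 0).length : Int)
      · rw [if_pos hc, if_pos (by simpa using hc)]
        have hlt : (turn_idx - rc).toNat < (pvPos role rest 0).length := by omega
        simp [List.getD, List.getElem?_map, List.getElem?_eq_getElem hlt, List.take_succ_cons]
      · rw [if_neg hc, if_neg (by simpa using hc)]

-- ===== VERDICT (by name: the statement is the Claim_ definition above) =====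
theorem build_prefix_for_turn_spec : Claim_equal_build_prefix_for_turn := by
  intro conversations turn_idx role _
  unfold Spec_build_prefix_for_turn build_prefix_for_turn
  rw [pvGoA_eq, alt_eq_nat]
  simp
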